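-- pv_equiv track=rewrite | github.com/TsungLin716/Applied-Cryptography-Project | DecryptionCode_final_withTestCase_internal/Xue+Yang+Lammert-decrypt-source-full.py | get_duplicate_indices
-- ===== SOURCE A (Python) =====
-- def get_duplicate_characters(word):
--     duplicates = {}
--     duplicates_list = []
--     for char in word:
--         if char in duplicates:
--             duplicates[char] += 1
--
--         else:
--             duplicates[char] = 1
--
--     for key, value in duplicates.items():
--         if value > 1:
--             duplicates_list.append(key)
--
--     return duplicates_list
--
-- def get_duplicate_indices(word):
--     temp = []
--     duplicates_indices= []
--     duplicates_char = get_duplicate_characters(word)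
--
--     for item in duplicates_char:
--         for char in range(len(word)):
--             if item == word[char]:
--                 temp.append(char)
--
--         #duplicates_indices.append(temp)
--         #temp = []
--
--     temp.sort()
--     duplicates_indices = temp
--     return duplicates_indices
-- ===== SOURCE B (Python) =====
-- def get_duplicate_indices(word):
--     positions = {}
--     for i, ch in enumerate(word):
--         positions.setdefault(ch, []).append(i)
--     result = []
--     for lst in positions.values():
--         if len(lst) > 1:
--             result += lst
--     result.sort()
--     return result
-- ===== Notes on version B (the rewrite author's own statement) =====
-- stated objective: simpler
-- what changed: A counts characters and then, for each duplicated character, rescans the whole word to collect its indices; B makes a single enumerate pass building a char->positions dict and just concatenates the position lists of length > 1, eliminating the per-duplicate rescan.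
import Mathlib
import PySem

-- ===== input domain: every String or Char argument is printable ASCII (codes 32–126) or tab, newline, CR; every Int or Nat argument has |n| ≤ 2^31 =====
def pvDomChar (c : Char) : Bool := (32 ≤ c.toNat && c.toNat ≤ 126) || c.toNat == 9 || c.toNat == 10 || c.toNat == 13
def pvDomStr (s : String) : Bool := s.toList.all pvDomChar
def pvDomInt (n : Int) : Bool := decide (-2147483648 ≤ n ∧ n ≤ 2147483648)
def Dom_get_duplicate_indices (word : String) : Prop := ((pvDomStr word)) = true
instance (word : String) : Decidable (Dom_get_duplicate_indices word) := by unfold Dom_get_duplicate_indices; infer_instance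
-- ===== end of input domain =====

-- B replaces A's count-then-rescan-per-duplicate-character with a single grouping pass (char -> list of indices); same return value, no speed claim.

-- ===== PORT A =====
-- helper of A: count each character, then collect the characters with count > 1 (insertion order)
def get_duplicate_characters (word : String) : List Char :=
  let duplicates : PySem.Dict Char Int :=
    word.toList.foldl
      (fun d char =>
        if d.contains char = true then d.modify char 0 (· + 1)
        else d.insert char 1)
      PySem.Dict.empty
  duplicates.items.foldl
    (fun l p => if p.2 > 1 then l ++ [p.1] else l) []

def get_duplicate_indices (word : String) : List Int :=
  let cs := word.toList
  let duplicates_char := get_duplicate_characters word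
  let temp :=
    duplicates_char.foldl
      (fun t item =>
        (PySem.List.pyRange 0 (cs.length : Int)).foldl
          (fun t char =>
            if PySem.List.pyGet? cs char = some item then t ++ [char] else t)
          t)
      []
  PySem.List.sorted temp (fun x => x) false

-- ===== PORT B =====
-- 'positions.setdefault(ch, []).append(i)' mutates the stored list in place; ported as modify (d[ch] = d.get(ch, []) + [i]), which is its exact effect
def get_duplicate_indices_alt (word : String) : List Int :=
  let positions : PySem.Dict Char (List Int) :=
    (PySem.List.enumerate word.toList 0).foldl
      (fun d p => d.modify p.2 [] (fun l => l ++ [p.1]))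
      PySem.Dict.empty
  let result :=
    positions.values.foldl
      (fun r lst => if lst.length > 1 then r ++ lst else r) []
  PySem.List.sorted result (fun x => x) false

-- ===== PRECONDITION & SPEC =====
def Spec_get_duplicate_indices (word : String) (out : List Int) : Prop := out = get_duplicate_indices_alt word
instance (word : String) (out : List Int) : Decidable (Spec_get_duplicate_indices word out) := by unfold Spec_get_duplicate_indices; infer_instance

-- ===== CLAIM (what is proved, stated in full; the proofs are below) =====
def Claim_equal_get_duplicate_indices : Prop := ∀ (word : String), Dom_get_duplicate_indices word → Spec_get_duplicate_indices word (get_duplicate_indices word)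

-- ===== LEMMAS AND PROOFS =====

-- the positions of character c in cs, in order (as Int indices)
def posIdx (cs : List Char) (c : Char) : List Int :=
  ((PySem.List.enumerate cs 0).filter (fun p => p.2 == c)).map (fun p => p.1)

-- A's counting step is exactly Counter's step
theorem stepA_eq (d : PySem.Dict Char Int) (c : Char) :
    (if d.contains c = true then d.modify c 0 (· + 1) else d.insert c 1)
      = d.modify c 0 (· + 1) := by
  by_cases h : d.contains c = true
  · simp [h]
  · simp only [h, Bool.false_eq_true, if_false]
    simp only [PySem.Dict.modify, PySem.Dict.getD, PySem.Dict.get?, PySem.Dict.contains] at *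
    simp only [Bool.not_eq_true, List.any_eq_false] at h
    rw [List.find?_eq_none.mpr]
    · simp
    · intro p hp; simp [h p hp]

-- A's duplicate-character list in Counter/Set terms
theorem dupchars_eq (word : String) :
    get_duplicate_characters word
      = (PySem.Set.ofList word.toList).filter
          (fun k => 1 < ((word.toList.count k : Int))) := by
  unfold get_duplicate_characters
  simp only [stepA_eq]
  rw [← PySem.Dict.counter_eq_foldl, PySem.Dict.items_counter]
  rw [PySem.List.foldl_congr_mem _ _
      (fun l (p : Char × Int) => if (decide (1 < p.2)) = true then l ++ [p.1] else l) _
      (by intro acc x _; by_cases h : 1 < x.2 <;> simp [h])]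
  rw [PySem.List.foldl_append_if (fun p : Char × Int => decide (1 < p.2)) (fun p => p.1)]
  rw [List.filter_map, List.map_map]
  simp [Function.comp_def]

-- A's inner rescan over range(len(word)) selects exactly posIdx
theorem filter_pyRange_eq (cs : List Char) (c : Char) :
    (PySem.List.pyRange 0 (cs.length : Int)).filter
        (fun i => decide (PySem.List.pyGet? cs i = some c))
      = posIdx cs c := by
  rw [posIdx, PySem.List.enumerate_eq_map_pyRange cs c]
  rw [List.filter_map, List.map_map]
  have hl : PySem.List.len cs = (cs.length : Int) := by simp [PySem.List.len]
  rw [hl]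
  rw [show ((fun p : Int × Char => p.1) ∘ fun j : Int => (j, PySem.List.pyGetD cs j c)) = id from rfl,
    List.map_id]
  apply List.filter_congr
  intro i hi
  rw [PySem.List.mem_pyRange_one] at hi
  obtain ⟨h0, hn⟩ := hi
  lift i to Nat using h0 with n
  have hlt : n < cs.length := by exact_mod_cast hn
  simp only [Function.comp_def, PySem.List.pyGet?_natCast, PySem.List.pyGetD_natCast]
  simp [List.getElem?_eq_getElem hlt, List.getD_eq_getElem?_getD, Bool.beq_eq_decide_eq]

-- B's grouping dict: lookup yields the position list
theorem getD_foldB (l : List (Int × Char)) (d : PySem.Dict Char (List Int)) (k : Char) :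
    (l.foldl (fun d p => d.modify p.2 [] (fun l => l ++ [p.1])) d).getD k []
      = d.getD k [] ++ (l.filter (fun p => p.2 == k)).map (fun p => p.1) := by
  induction l generalizing d with
  | nil => simp
  | cons x xs ih =>
    simp only [List.foldl_cons, ih]
    by_cases h : x.2 = k
    · subst h
      simp [PySem.Dict.getD_modify_self]
    · rw [PySem.Dict.getD_modify_of_ne d [] _ (Ne.symm ?_)]
      · simp [beq_eq_false_iff_ne.mpr h]
      · exact h

-- keys after an insert, in Python's order
theorem keys_insertD {ν : Type} (d : PySem.Dict Char ν) (k : Char) (v : ν) :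
    (d.insert k v).keys = if k ∈ d.keys then d.keys else d.keys ++ [k] := by
  by_cases h : k ∈ d.keys
  · have hc : d.contains k = true := (PySem.Dict.contains_iff_mem_keys d k).mpr h
    simp only [PySem.Dict.insert, hc, if_pos, PySem.Dict.keys, List.map_map]
    rw [if_pos (show k ∈ List.map (fun x => x.1) d.items from h)]
    apply List.map_congr_left
    intro p _
    by_cases hh : p.1 = k
    · simp [hh]
    · simp [hh]
  · have hc : d.contains k = false := by
      rw [← Bool.not_eq_true, (PySem.Dict.contains_iff_mem_keys d k)]; exact h
    simp only [PySem.Dict.insert, hc, Bool.false_eq_true, if_false, PySem.Dict.keys, List.map_append]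
    rw [if_neg (show k ∉ List.map (fun x => x.1) d.items from h)]
    rfl

theorem keys_foldB (l : List (Int × Char)) (d : PySem.Dict Char (List Int)) :
    (l.foldl (fun d p => d.modify p.2 [] (fun l => l ++ [p.1])) d).keys
      = l.foldl (fun ks p => if p.2 ∈ ks then ks else ks ++ [p.2]) d.keys := by
  induction l generalizing d with
  | nil => rfl
  | cons x xs ih =>
    simp only [List.foldl_cons]
    rw [ih]
    simp only [PySem.Dict.modify]
    rw [keys_insertD]

theorem keys_foldB_empty (cs : List Char) :
    ((PySem.List.enumerate cs 0).foldl
        (fun d p => d.modify p.2 [] (fun l => l ++ [p.1]))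
        (PySem.Dict.empty : PySem.Dict Char (List Int))).keys
      = PySem.Set.ofList cs := by
  rw [keys_foldB]
  have h1 : cs = (PySem.List.enumerate cs 0).map (fun p => p.2) :=
    (PySem.List.map_snd_enumerate cs 0).symm
  rw [PySem.Set.ofList]
  conv_rhs => rw [h1]
  rw [List.foldl_map]
  have h2 : (PySem.Dict.empty : PySem.Dict Char (List Int)).keys = (PySem.Set.empty : PySem.Set Char) := rfl
  rw [h2]
  apply PySem.List.foldl_congr_mem
  intro acc x _
  by_cases h : x.2 ∈ acc
  · simp [PySem.Set.add, h]
  · simp [PySem.Set.add, h]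

theorem length_posIdx (cs : List Char) (c : Char) :
    (posIdx cs c).length = cs.count c := by
  rw [posIdx, List.length_map, ← List.countP_eq_length_filter]
  have h := PySem.List.map_snd_enumerate cs 0
  conv_rhs => rw [← h]
  rw [List.count_eq_countP, List.countP_map]
  rfl

theorem flatMap_filter_ite {α β : Type} (p : α → Bool) (g : α → List β) (l : List α) :
    (l.filter p).flatMap g = l.flatMap (fun x => if p x = true then g x else []) := by
  induction l with
  | nil => rfl
  | cons x xs ih => by_cases h : p x = true <;> simp [h, ih]

-- the two pre-sort lists are equal
theorem presort_eq (word : String) :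
    (get_duplicate_characters word).foldl
        (fun t item =>
          (PySem.List.pyRange 0 (word.toList.length : Int)).foldl
            (fun t char =>
              if PySem.List.pyGet? word.toList char = some item then t ++ [char] else t)
            t)
        []
      = (((PySem.List.enumerate word.toList 0).foldl
            (fun d p => d.modify p.2 [] (fun l => l ++ [p.1]))
            (PySem.Dict.empty : PySem.Dict Char (List Int))).values).foldl
          (fun r lst => if lst.length > 1 then r ++ lst else r) [] := by
  -- left side: flatMap of posIdx over the duplicated characters
  have hinner : ∀ (t : List Int) (item : Char),
      (PySem.List.pyRange 0 (word.toList.length : Int)).foldl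
        (fun t char => if PySem.List.pyGet? word.toList char = some item then t ++ [char] else t) t
      = t ++ posIdx word.toList item := by
    intro t item
    rw [PySem.List.foldl_congr_mem _ _
        (fun t i => if (decide (PySem.List.pyGet? word.toList i = some item)) = true then t ++ [i] else t) _
        (by intro acc x _; by_cases h : PySem.List.pyGet? word.toList x = some item <;> simp [h])]
    rw [PySem.List.foldl_append_if _ (fun i => i)]
    rw [filter_pyRange_eq, List.map_id']
  simp only [hinner]
  rw [dupchars_eq, PySem.List.foldl_append_eq_flatMap, flatMap_filter_ite]
  -- right side: flatMap of posIdx over all first occurrences, keeping only lists of length > 1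
  have hkeys := keys_foldB_empty word.toList
  have hnd : ((PySem.List.enumerate word.toList 0).foldl
      (fun d p => d.modify p.2 [] (fun l => l ++ [p.1]))
      (PySem.Dict.empty : PySem.Dict Char (List Int))).keys.Nodup := by
    rw [hkeys]; exact PySem.Set.nodup_ofList _
  rw [PySem.Dict.values_eq_map_keys _ hnd [], hkeys]
  have hgetD : ∀ k, ((PySem.List.enumerate word.toList 0).foldl
      (fun d p => d.modify p.2 [] (fun l => l ++ [p.1]))
      (PySem.Dict.empty : PySem.Dict Char (List Int))).getD k [] = posIdx word.toList k := by
    intro k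
    rw [getD_foldB]
    simp [PySem.Dict.getD_empty, posIdx]
  simp only [hgetD]
  rw [PySem.List.foldl_congr_mem _ _
      (fun r lst => r ++ (if lst.length > 1 then lst else [])) _
      (by intro acc x _; by_cases h : x.length > 1 <;> simp [h])]
  rw [PySem.List.foldl_append_eq_flatMap, List.flatMap_map]
  simp only [List.nil_append]
  congr 1
  funext k
  by_cases h : 1 < word.toList.count k
  · simp [length_posIdx, h]
  · simp [length_posIdx, h]

-- ===== VERDICT (by name: the statement is the Claim_ definition above) =====
theorem get_duplicate_indices_spec : Claim_equal_get_duplicate_indices := by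
  intro word _
  unfold Spec_get_duplicate_indices get_duplicate_indices get_duplicate_indices_alt
  exact congrArg (fun t => PySem.List.sorted t (fun x => x) false) (presort_eq word)
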